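-- pv_equiv track=rewrite | github.com/sean-sunagaku/cc-roundtable | src/packages/meeting-room-hooks/stop-relay.py | _pick_best_text
-- ===== SOURCE A (Python) =====
-- def _pick_best_text(candidates: list[str]) -> str:
--     cleaned: list[str] = []
--     seen = set()
--     for item in candidates:
--         compact = item.strip()
--         if not compact:
--             continue
--         if compact in seen:
--             continue
--         seen.add(compact)
--         cleaned.append(compact)
--     if not cleaned:
--         return ""
--     cleaned.sort(key=len, reverse=True)
--     return cleaned[0]
-- ===== SOURCE B (Python) =====
-- def _pick_best_text(candidates: list[str]) -> str:
--     best = ""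
--     for item in candidates:
--         compact = item.strip()
--         if len(compact) > len(best):
--             best = compact
--     return best
-- ===== Notes on version B (the rewrite author's own statement) =====
-- stated objective: faster
-- what changed: Replaces the dedup-set plus stable length sort with a single linear pass that keeps the first stripped candidate of maximal length.
import Mathlib
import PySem

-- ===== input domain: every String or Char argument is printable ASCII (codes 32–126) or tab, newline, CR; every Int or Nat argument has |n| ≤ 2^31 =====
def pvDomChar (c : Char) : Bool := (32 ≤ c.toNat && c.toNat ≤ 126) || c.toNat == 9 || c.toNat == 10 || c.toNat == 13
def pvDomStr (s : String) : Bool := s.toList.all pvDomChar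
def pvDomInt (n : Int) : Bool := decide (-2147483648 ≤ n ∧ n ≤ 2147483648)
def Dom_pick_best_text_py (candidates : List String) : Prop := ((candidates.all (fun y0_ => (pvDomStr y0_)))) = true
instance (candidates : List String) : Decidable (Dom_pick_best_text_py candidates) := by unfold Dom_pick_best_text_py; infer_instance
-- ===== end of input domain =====

-- B replaces A's dedup-set + stable sort-by-length with one linear pass keeping the
-- first stripped candidate of maximal length (objective: faster).

-- ===== PORT A =====
def pick_best_text_py (candidates : List String) : String :=
  let st := candidates.foldl
    (fun (st : List String × PySem.Set String) item =>
      let compact := PySem.Str.strip item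
      if compact = "" then st
      else if PySem.Set.contains st.2 compact then st
      else (st.1 ++ [compact], PySem.Set.add st.2 compact))
    ([], PySem.Set.empty)
  let cleaned := st.1
  if cleaned = [] then ""
  else (PySem.List.sorted cleaned PySem.Str.len true).headD ""

-- ===== PORT B =====
def pick_best_text_py_alt (candidates : List String) : String :=
  candidates.foldl
    (fun best item =>
      let compact := PySem.Str.strip item
      if PySem.Str.len best < PySem.Str.len compact then compact else best)
    ""

-- ===== PRECONDITION & SPEC =====
def Spec_pick_best_text_py (candidates : List String) (out : String) : Prop := out = pick_best_text_py_alt candidates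
instance (candidates : List String) (out : String) : Decidable (Spec_pick_best_text_py candidates out) := by unfold Spec_pick_best_text_py; infer_instance

-- ===== CLAIM (what is proved, stated in full; the proofs are below) =====
def Claim_equal_pick_best_text_py : Prop := ∀ (candidates : List String), Dom_pick_best_text_py candidates → Spec_pick_best_text_py candidates (pick_best_text_py candidates)

-- ===== LEMMAS AND PROOFS =====

-- A's loop step (on the pair state) and B's loop step, named for the proofs.
def pvStepA (st : List String × PySem.Set String) (item : String) : List String × PySem.Set String :=
  let compact := PySem.Str.strip item
  if compact = "" then st
  else if PySem.Set.contains st.2 compact then st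
  else (st.1 ++ [compact], PySem.Set.add st.2 compact)

def pvStepB (best item : String) : String :=
  let compact := PySem.Str.strip item
  if PySem.Str.len best < PySem.Str.len compact then compact else best

theorem pvLen_nonneg (s : String) : 0 ≤ PySem.Str.len s := by
  simp [PySem.Str.len]

theorem pvLen_pos (s : String) (h : s ≠ "") : 0 < PySem.Str.len s := by
  simp only [PySem.Str.len]
  have hne : s.toList ≠ [] := by
    intro hn
    exact h (by simpa using congrArg String.ofList hn)
  have : s.toList.length ≠ 0 := by simpa [List.length_eq_zero_iff] using hne
  omega

-- head of the reverse-stable insertion used by sorted(-, key=len, reverse=True)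
theorem pvHead_insertBy (x : String) (l : List String) :
    (PySem.List.insertBy (fun a b => decide (PySem.Str.len b < PySem.Str.len a)) x l).headD "" =
      (match l with
       | [] => x
       | y :: _ => if PySem.Str.len y < PySem.Str.len x then x else y) := by
  cases l with
  | nil => simp [PySem.List.insertBy]
  | cons y ys =>
      by_cases h : y.length < x.length <;>
        simp [PySem.List.insertBy, PySem.Str.len, h]

-- invariant of the two loops, run in lockstep
def pvInv (cleaned : List String) (seen : PySem.Set String) (b : String) : Prop :=
  (∀ s : String, s ∈ seen ↔ s ∈ cleaned) ∧
  (∀ s ∈ cleaned, PySem.Str.len s ≤ PySem.Str.len b) ∧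
  (cleaned = [] → b = "") ∧
  (PySem.List.sorted cleaned PySem.Str.len true).headD "" = b

theorem pvSorted_append (cleaned : List String) (x : String) :
    PySem.List.sorted (cleaned ++ [x]) PySem.Str.len true =
      PySem.List.insertBy (fun a b => decide (PySem.Str.len b < PySem.Str.len a)) x
        (PySem.List.sorted cleaned PySem.Str.len true) := by
  rw [PySem.List.sorted_rev_eq_foldl_insertBy, PySem.List.sorted_rev_eq_foldl_insertBy,
    List.foldl_append]
  rfl

theorem pvInv_step (cleaned : List String) (seen : PySem.Set String) (b item : String)
    (h : pvInv cleaned seen b) :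
    pvInv (pvStepA (cleaned, seen) item).1 (pvStepA (cleaned, seen) item).2 (pvStepB b item) := by
  obtain ⟨hmem, hbd, hnil, hhd⟩ := h
  unfold pvStepA pvStepB
  by_cases he : PySem.Str.strip item = ""
  · -- empty strip: A skips; B's candidate has length 0, so best is unchanged
    have hlt : ¬ PySem.Str.len b < PySem.Str.len (PySem.Str.strip item) := by
      rw [he]; have := pvLen_nonneg b; simp only [PySem.Str.len, String.toList_empty,
        List.length_nil, Nat.cast_zero]; omega
    rw [if_pos he, if_neg hlt]
    exact ⟨hmem, hbd, hnil, hhd⟩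
  · by_cases hs : PySem.Set.contains seen (PySem.Str.strip item) = true
    · -- already seen: its length is ≤ best's, so B is unchanged too
      have hin : PySem.Str.strip item ∈ cleaned := (hmem _).1 ((PySem.Set.contains_iff _ _).1 hs)
      have hlt : ¬ PySem.Str.len b < PySem.Str.len (PySem.Str.strip item) := by
        have := hbd _ hin; omega
      rw [if_neg he, if_pos hs, if_neg hlt]
      exact ⟨hmem, hbd, hnil, hhd⟩
    · rw [if_neg he, if_neg hs]
      refine ⟨?_, ?_, ?_, ?_⟩
      · intro s
        simp only [PySem.Set.mem_add, List.mem_append, List.mem_singleton, hmem]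
      · intro s hsmem
        rcases List.mem_append.1 hsmem with hl | hr
        · have hsb := hbd _ hl
          by_cases hlt : PySem.Str.len b < PySem.Str.len (PySem.Str.strip item)
          · rw [if_pos hlt]; omega
          · rw [if_neg hlt]; exact hsb
        · simp only [List.mem_singleton] at hr; subst hr
          by_cases hlt : PySem.Str.len b < PySem.Str.len (PySem.Str.strip item)
          · rw [if_pos hlt]
          · rw [if_neg hlt]; omega
      · intro hc; simp at hc
      · show (PySem.List.sorted (cleaned ++ [PySem.Str.strip item]) PySem.Str.len true).headD ""
            = _
        rw [pvSorted_append, pvHead_insertBy]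
        cases hc : PySem.List.sorted cleaned PySem.Str.len true with
        | nil =>
            have hcl : cleaned = [] := (PySem.List.sorted_eq_nil_iff _ _ _).1 hc
            have hb : b = "" := hnil hcl
            subst hb
            rw [if_pos (by simpa [PySem.Str.len] using pvLen_pos _ he)]
        | cons y ys =>
            have hy : y = b := by rw [hc] at hhd; simpa using hhd
            subst hy
            rfl

theorem pvInv_foldl (cs : List String) :
    ∀ (cleaned : List String) (seen : PySem.Set String) (b : String),
      pvInv cleaned seen b →
      pvInv (cs.foldl pvStepA (cleaned, seen)).1 (cs.foldl pvStepA (cleaned, seen)).2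
        (cs.foldl pvStepB b) := by
  induction cs with
  | nil => intro cleaned seen b h; exact h
  | cons c cs ih =>
      intro cleaned seen b h
      have h' := pvInv_step cleaned seen b c h
      simpa [List.foldl_cons] using
        ih (pvStepA (cleaned, seen) c).1 (pvStepA (cleaned, seen) c).2 (pvStepB b c) h'

-- ===== VERDICT (by name: the statement is the Claim_ definition above) =====
theorem pick_best_text_py_spec : Claim_equal_pick_best_text_py := by
  intro candidates _
  unfold Spec_pick_best_text_py pick_best_text_py pick_best_text_py_alt
  have h0 : pvInv [] PySem.Set.empty "" := by
    refine ⟨by simp [PySem.Set.empty], by simp, fun _ => rfl, by simp [PySem.List.sorted]⟩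
  have h := pvInv_foldl candidates [] PySem.Set.empty "" h0
  obtain ⟨-, -, hnil, hhd⟩ := h
  show (let st := candidates.foldl pvStepA ([], PySem.Set.empty);
        let cleaned := st.1;
        if cleaned = [] then ""
        else (PySem.List.sorted cleaned PySem.Str.len true).headD "") =
      candidates.foldl pvStepB ""
  by_cases hc : (candidates.foldl pvStepA ([], PySem.Set.empty)).1 = []
  · simp only [hc]
    exact (hnil hc).symm
  · simp only [if_neg hc]
    exact hhd
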